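-- pv_equiv track=rewrite | github.com/lukemwood42/PyMark | findMaxGrade.py | getRidWeight
-- ===== SOURCE A (Python) =====
-- def getRidWeight(r):
--     rList = []
--     for splitedR in r:
--         if splitedR != r[-1]:
--             while(splitedR != "" and splitedR[-1].isdigit()): splitedR = splitedR[:-1]
--         if splitedR != "": rList.append(splitedR)
--
--     rListTemp = []
--     for rl in rList:
--         rl = rl.split('or')
--         for temp in rl:
--             if temp!="":rListTemp.append(temp)
--     return rListTemp
-- ===== SOURCE B (Python) =====
-- def getRidWeight(r):
--     # Different decomposition: a forward scan records the index after the last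
--     # non-digit character (instead of peeling digits off the end), and the
--     # 'or'-fragments are emitted by repeated str.find on the remaining suffix
--     # (instead of building intermediate lists with split); one traversal of r.
--     out = []
--     last = r[-1] if r else None
--     for s in r:
--         if s != last:
--             cut = 0
--             for i, c in enumerate(s):
--                 if not ('0' <= c <= '9'):
--                     cut = i + 1
--             t = s[:cut]
--         else:
--             t = s
--         while True:
--             j = t.find('or')
--             if j < 0:
--                 if t:
--                     out.append(t)
--                 break
--             if j:
--                 out.append(t[:j])
--             t = t[j + 2:]
--     return out
-- ===== Notes on version B (the rewrite author's own statement) =====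
-- stated objective: alternative
-- what changed: B replaces A's backward digit-peeling while-loop by a forward scan that records the index after the last non-digit and slices there, replaces split('or') plus a filtering re-scan by a find-based emitter that walks the string left-to-right appending non-empty fragments directly, and fuses A's two list passes into one traversal of r.
import Mathlib
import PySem

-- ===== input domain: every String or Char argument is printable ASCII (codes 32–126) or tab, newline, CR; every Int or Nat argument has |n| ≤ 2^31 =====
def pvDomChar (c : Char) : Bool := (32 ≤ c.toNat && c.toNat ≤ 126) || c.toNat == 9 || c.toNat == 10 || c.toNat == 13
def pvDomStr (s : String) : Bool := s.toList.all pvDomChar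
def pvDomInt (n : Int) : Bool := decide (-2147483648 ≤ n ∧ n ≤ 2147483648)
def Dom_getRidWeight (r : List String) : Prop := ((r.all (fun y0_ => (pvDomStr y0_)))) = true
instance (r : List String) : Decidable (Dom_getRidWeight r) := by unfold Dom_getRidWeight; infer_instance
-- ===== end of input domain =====

-- B replaces backward digit-peeling by a forward last-non-digit scan, split('or')+filter
-- by a find-based fragment emitter, and fuses A's two passes into one; objective: alternative.

-- ===== PORT A =====
-- A's while loop 'while s != "" and s[-1].isdigit(): s = s[:-1]' on the code points:
-- s[-1] of a non-empty string is its last code point, s[:-1] is dropLast (exact).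
def pvPeelA (s : List Char) : List Char :=
  if h : s ≠ [] ∧ (s.getLast?.elim false PySem.Chars.isdigit) then pvPeelA s.dropLast else s
termination_by s.length
decreasing_by
  have := List.length_pos_iff.mpr h.1
  simp [List.length_dropLast]; omega

-- rl.split('or') (separator ≠ "", exact; code points via toList)
def pvSplitOr (t : String) : List String :=
  (PySem.Chars.splitOn t.toList "or".toList).map String.ofList

def getRidWeight (r : List String) : List String :=
  (r.foldl (fun rList splitedR =>
      let splitedR := if some splitedR ≠ PySem.List.pyGet? r (-1)
        then String.ofList (pvPeelA splitedR.toList) else splitedR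
      if splitedR ≠ "" then rList ++ [splitedR] else rList) []).foldl
    (fun rListTemp rl =>
      (pvSplitOr rl).foldl
        (fun rListTemp temp => if temp ≠ "" then rListTemp ++ [temp] else rListTemp)
        rListTemp) []

-- ===== PORT B =====
-- t.find('or'): index of the leftmost occurrence, none if absent (exact on code points)
def pvFindOr : List Char → Option Nat
  | [] => none
  | c :: rest =>
    if ['o', 'r'].isPrefixOf (c :: rest) then some 0
    else (pvFindOr rest).map (· + 1)

-- the port's while-loop needs this bound for termination
lemma pvFindOr_le {t : List Char} {j : Nat} (h : pvFindOr t = some j) : j + 2 ≤ t.length := by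
  induction t generalizing j with
  | nil => simp [pvFindOr] at h
  | cons c rest ih =>
    rw [pvFindOr] at h
    split at h
    · rename_i hp
      cases h
      obtain ⟨u, hu⟩ := List.isPrefixOf_iff_prefix.mp hp
      simp [← hu]
    · rcases Option.map_eq_some_iff.mp h with ⟨k, hk, rfl⟩
      have := ih hk
      simp; omega

-- B's 'while True: j = t.find("or"); …; t = t[j+2:]' loop (state = the suffix t, out)
def pvEmit (t : List Char) (out : List String) : List String :=
  match h : pvFindOr t with
  | none => if t ≠ [] then out ++ [String.ofList t] else out
  | some j =>
    pvEmit (t.drop (j + 2)) (if 0 < j then out ++ [String.ofList (t.take j)] else out)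
termination_by t.length
decreasing_by
  have := pvFindOr_le h
  simp; omega

-- B's forward scan: 'cut = 0; for i, c in enumerate(s): if not ('0' <= c <= '9'): cut = i + 1'
def pvCut (l : List Char) : Nat :=
  l.zipIdx.foldl (fun cut ci => if ¬('0' ≤ ci.1 ∧ ci.1 ≤ '9') then ci.2 + 1 else cut) 0

def getRidWeight_alt (r : List String) : List String :=
  match r.getLast? with
  | none => []
  | some last =>
    r.foldl (fun out s =>
      let t : List Char := if s = last then s.toList else s.toList.take (pvCut s.toList)
      pvEmit t out) []

-- ===== PRECONDITION & SPEC =====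
def Spec_getRidWeight (r : List String) (out : List String) : Prop := out = getRidWeight_alt r
instance (r : List String) (out : List String) : Decidable (Spec_getRidWeight r out) := by unfold Spec_getRidWeight; infer_instance

-- ===== CLAIM =====
def Claim_equal_getRidWeight : Prop := ∀ (r : List String), Dom_getRidWeight r → Spec_getRidWeight r (getRidWeight r)

-- ===== LEMMAS AND PROOFS =====

-- proof-only abbreviations
def pvTA (last s : String) : String := if s = last then s else String.ofList (pvPeelA s.toList)
def pvTB (last s : String) : List Char := if s = last then s.toList else s.toList.take (pvCut s.toList)
def pvFragL (t : List Char) : List String :=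
  ((PySem.Chars.splitOn t "or".toList).map String.ofList).filter (fun f => f ≠ "")

lemma pv_pyGet_neg_one {α : Type} (r : List α) : PySem.List.pyGet? r (-1) = r.getLast? := by
  cases r with
  | nil => simp [PySem.List.pyGet?, PySem.List.pyIdx?]
  | cons a as => simp [PySem.List.pyGet?, PySem.List.pyIdx?, List.getLast?_eq_getElem?]

-- A's backward peel = drop the trailing digit run
lemma pv_peel_rev (m : List Char) :
    pvPeelA m.reverse = (m.dropWhile PySem.Chars.isdigit).reverse := by
  induction m with
  | nil => rw [pvPeelA]; simp
  | cons c m ih =>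
    rw [List.reverse_cons, pvPeelA]
    cases h : PySem.Chars.isdigit c with
    | true => simp [h, ih]
    | false => simp [h]

lemma pv_peel_eq (l : List Char) :
    pvPeelA l = (l.reverse.dropWhile PySem.Chars.isdigit).reverse := by
  conv_lhs => rw [← l.reverse_reverse]
  rw [pv_peel_rev]

-- B's forward scan agrees with the backward peel
lemma pv_dig_iff (c : Char) : PySem.Chars.isdigit c = true ↔ ('0' ≤ c ∧ c ≤ '9') := by
  simp [PySem.Chars.isdigit]

lemma pv_cut_append (l : List Char) (c : Char) :
    pvCut (l ++ [c]) = if ¬('0' ≤ c ∧ c ≤ '9') then l.length + 1 else pvCut l := by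
  simp [pvCut, List.zipIdx_append, List.foldl_append]

lemma pv_cut_le (l : List Char) : pvCut l ≤ l.length := by
  induction l using List.reverseRecOn with
  | nil => simp [pvCut]
  | append_singleton l c ih =>
    rw [pv_cut_append]
    split <;> simp <;> omega

lemma pv_cut_eq (l : List Char) : l.take (pvCut l) = pvPeelA l := by
  rw [pv_peel_eq]
  induction l using List.reverseRecOn with
  | nil => simp [pvCut]
  | append_singleton l c ih =>
    rw [pv_cut_append, List.reverse_append]
    by_cases hc : ('0' ≤ c ∧ c ≤ '9')
    · have hd : PySem.Chars.isdigit c = true := (pv_dig_iff c).mpr hc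
      rw [if_neg (not_not_intro hc), List.take_append_of_le_length (pv_cut_le l)]
      simpa [hd] using ih
    · have hd : PySem.Chars.isdigit c = false := by
        cases h : PySem.Chars.isdigit c
        · rfl
        · exact absurd ((pv_dig_iff c).mp h) hc
      simp [hc, hd]

-- splitOn characterised through pvFindOr
def pvMySplitCur (cur l : List Char) : List (List Char) :=
  match h : pvFindOr l with
  | none => [cur.reverse ++ l]
  | some j => (cur.reverse ++ l.take j) :: pvMySplitCur [] (l.drop (j + 2))
termination_by l.length
decreasing_by
  have := pvFindOr_le h
  simp; omega

lemma pv_mysplit_none {l : List Char} (cur : List Char) (h : pvFindOr l = none) :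
    pvMySplitCur cur l = [cur.reverse ++ l] := by
  rw [pvMySplitCur.eq_def]; split <;> simp_all

lemma pv_mysplit_some {l : List Char} {j : Nat} (cur : List Char) (h : pvFindOr l = some j) :
    pvMySplitCur cur l = (cur.reverse ++ l.take j) :: pvMySplitCur [] (l.drop (j + 2)) := by
  rw [pvMySplitCur.eq_def]; split <;> simp_all

lemma pv_mysplit_cons {c : Char} {rest : List Char} (cur : List Char)
    (hp : ¬ (['o', 'r'].isPrefixOf (c :: rest) = true)) :
    pvMySplitCur (c :: cur) rest = pvMySplitCur cur (c :: rest) := by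
  cases hf : pvFindOr rest with
  | none =>
    have h2 : pvFindOr (c :: rest) = none := by simp [pvFindOr, hp, hf]
    rw [pv_mysplit_none _ hf, pv_mysplit_none _ h2]
    simp
  | some j =>
    have h2 : pvFindOr (c :: rest) = some (j + 1) := by simp [pvFindOr, hp, hf]
    rw [pv_mysplit_some _ hf, pv_mysplit_some _ h2]
    simp

lemma pv_go_eq (fuel : Nat) (l cur : List Char) (acc : List (List Char))
    (h : l.length < fuel) :
    PySem.Chars.splitOn.go "or".toList fuel l cur acc
    = acc.reverse ++ pvMySplitCur cur l := by
  have hor : "or".toList = ['o', 'r'] := by decide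
  rw [hor]
  induction fuel generalizing l cur acc with
  | zero => omega
  | succ f ih =>
    cases l with
    | nil =>
      rw [PySem.Chars.splitOn.go, pv_mysplit_none cur (by rw [pvFindOr])]
      all_goals simp
    | cons c rest =>
      rw [PySem.Chars.splitOn.go]
      by_cases hp : (['o', 'r'].isPrefixOf (c :: rest) = true)
      · have hj : pvFindOr (c :: rest) = some 0 := by simp [pvFindOr, hp]
        have hlt : (List.drop 2 (c :: rest)).length < f := by
          simp only [List.length_drop, List.length_cons] at h ⊢
          omega
        rw [if_pos hp, show (['o', 'r'] : List Char).length = 2 from rfl,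
          ih _ _ _ hlt, pv_mysplit_some cur hj]
        simp
      · have hlt2 : rest.length < f := by
          simp only [List.length_cons] at h
          omega
        rw [if_neg hp, ih _ _ _ hlt2, pv_mysplit_cons cur hp]

lemma pv_splitOn_eq (l : List Char) :
    PySem.Chars.splitOn l "or".toList = pvMySplitCur [] l := by
  rw [PySem.Chars.splitOn, pv_go_eq _ _ _ _ (by omega)]
  simp

-- B's emitter = the non-empty 'or'-fragments, appended in order
lemma pv_ofList_ne (l : List Char) : (String.ofList l ≠ "") ↔ l ≠ [] := by
  constructor
  · intro h hl; exact h (by rw [hl])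
  · intro h he
    apply h
    have := congrArg String.toList he
    simpa using this

lemma pv_splitOn_eq' (l : List Char) :
    PySem.Chars.splitOn l ['o', 'r'] = pvMySplitCur [] l := by
  have hor : "or".toList = ['o', 'r'] := by decide
  rw [← hor, pv_splitOn_eq]

lemma pv_emit_eq (t : List Char) (out : List String) :
    pvEmit t out = out ++ pvFragL t := by
  generalize hn : t.length = n
  induction n using Nat.strong_induction_on generalizing t out with
  | _ n ih =>
    rw [pvEmit.eq_def]
    split
    · rename_i h
      rw [pvFragL, pv_splitOn_eq, pv_mysplit_none _ h]
      by_cases ht : t = []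
      · subst ht; simp [List.filter]
      · simp [ht, (pv_ofList_ne t).mpr ht, List.filter]
    · rename_i j h
      have hlen := pvFindOr_le h
      have hd : (t.drop (j + 2)).length < n := by
        simp only [List.length_drop]
        omega
      rw [ih (t.drop (j + 2)).length hd _ _ rfl]
      conv_rhs => rw [pvFragL, pv_splitOn_eq, pv_mysplit_some _ h]
      by_cases hj : 0 < j
      · have ht : t ≠ [] := by
          intro hcon
          subst hcon
          simp at hlen
        have hne : t.take j ≠ [] := by
          simp only [ne_eq, List.take_eq_nil_iff, not_or]
          exact ⟨by omega, ht⟩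
        simp [hj, (pv_ofList_ne _).mpr hne, pvFragL, pv_splitOn_eq']
      · have hj0 : j = 0 := by omega
        subst hj0
        simp [pvFragL, pv_splitOn_eq']

-- A's first loop builds rList = the non-empty transformed elements, in order
lemma pv_foldl_A1 (last : String) (l acc : List String) :
    l.foldl (fun rList splitedR =>
      let splitedR := if some splitedR ≠ some last
        then String.ofList (pvPeelA splitedR.toList) else splitedR
      if splitedR ≠ "" then rList ++ [splitedR] else rList) acc
    = acc ++ ((l.map (pvTA last)).filter (fun u => u ≠ "")) := by
  induction l generalizing acc with
  | nil => simp
  | cons x xs ih =>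
    rw [List.foldl_cons, ih]
    by_cases hx : x = last <;> by_cases he : pvTA last x = "" <;>
      simp_all [pvTA]

-- A's second loop flat-maps the non-empty 'or'-fragments
lemma pv_foldl_A2 (rList acc : List String) :
    rList.foldl (fun rListTemp rl =>
      (pvSplitOr rl).foldl
        (fun rListTemp temp => if temp ≠ "" then rListTemp ++ [temp] else rListTemp)
        rListTemp) acc
    = acc ++ rList.flatMap (fun rl => pvFragL rl.toList) := by
  induction rList generalizing acc with
  | nil => simp
  | cons x xs ih =>
    rw [List.foldl_cons, PySem.List.foldl_append_ite_eq_filter, ih]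
    simp [pvFragL, pvSplitOr, List.append_assoc]

-- B's single loop, characterised
lemma pv_foldl_B (last : String) (l acc : List String) :
    l.foldl (fun out s =>
      let t : List Char := if s = last then s.toList else s.toList.take (pvCut s.toList)
      pvEmit t out) acc
    = acc ++ l.flatMap (fun s => pvFragL (pvTB last s)) := by
  induction l generalizing acc with
  | nil => simp
  | cons x xs ih =>
    rw [List.foldl_cons, pv_emit_eq, ih]
    simp [pvTB]

lemma pv_join (last : String) (l : List String) :
    ((l.map (pvTA last)).filter (fun u => u ≠ "")).flatMap (fun rl => pvFragL rl.toList)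
    = l.flatMap (fun s => pvFragL (pvTB last s)) := by
  have key : ∀ s, (pvTA last s).toList = pvTB last s := by
    intro s
    rw [pvTA, pvTB]
    by_cases hs : s = last
    · simp [hs]
    · simp only [hs, if_false]
      rw [pv_cut_eq]
      simp
  induction l with
  | nil => simp
  | cons x xs ih =>
    simp only [List.map_cons, List.filter_cons, List.flatMap_cons]
    by_cases he : pvTA last x = ""
    · have : pvFragL (pvTB last x) = [] := by
        rw [← key, he]
        rw [pvFragL, pv_splitOn_eq, pv_mysplit_none _ rfl]
        simp [List.filter]
      simp only [this, List.nil_append, he]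
      simpa using ih
    · simp only [he, ne_eq, not_false_eq_true, decide_true, if_true, List.flatMap_cons, key]
      rw [ih]

-- ===== VERDICT =====
theorem getRidWeight_spec : Claim_equal_getRidWeight := by
  intro r _
  unfold Spec_getRidWeight getRidWeight getRidWeight_alt
  cases hr : r.getLast? with
  | none =>
    have : r = [] := List.getLast?_eq_none_iff.mp hr
    subst this; simp
  | some last =>
    simp only [pv_pyGet_neg_one, hr]
    rw [pv_foldl_A1 last r [], List.nil_append, pv_foldl_A2, pv_foldl_B last r [],
      List.nil_append, List.nil_append, pv_join]
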